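-- pv_equiv track=rewrite | github.com/brevnishko2/edu_epam | hw2/tasks/task_2.py | major_and_minor_elem
-- ===== SOURCE A (Python) =====
-- from typing import Dict, List, Tuple
--
-- def major_and_minor_elem(inp: List[int]) -> Tuple[int, int]:
--     """
--     :param inp: array is non-empty and the most common element
--     always exist in the array
--     :return: Tuple(least_common_elem, most_common_elem)
--     """
--     value_count_dict: Dict[int, int] = {}
--     for value in inp:
--         if value in value_count_dict:
--             value_count_dict[value] += 1
--         else:
--             value_count_dict[value] = 1
--     return (
--         max(value_count_dict.items(), key=lambda item: item[1])[0],
--         min(value_count_dict.items(), key=lambda item: item[1])[0],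
--     )
-- ===== SOURCE B (Python) =====
-- from typing import List, Tuple
--
--
-- def major_and_minor_elem(inp: List[int]) -> Tuple[int, int]:
--     # Dict-free decomposition: ordered dedup of the values, then one scan
--     # keeping best/worst with strict comparisons (first-occurrence ties win).
--     keys = list(dict.fromkeys(inp))
--     best = worst = keys[0]
--     best_c = worst_c = inp.count(best)
--     for k in keys[1:]:
--         c = inp.count(k)
--         if c > best_c:
--             best, best_c = k, c
--         if c < worst_c:
--             worst, worst_c = k, c
--     return (best, worst)
-- ===== Notes on version B (the rewrite author's own statement) =====
-- stated objective: alternative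
-- what changed: B drops the count dict and the two max/min library reductions entirely: it dedups the values in first-occurrence order, counts each distinct value with list.count, and keeps best/worst in one scan with strict comparisons (first-wins ties preserved); B trades speed for this dict-free decomposition and is slower on inputs with many distinct values.
-- outside the precondition, e.g. on major_and_minor_elem([]): A raises ValueError, B raises IndexError
import Mathlib
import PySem

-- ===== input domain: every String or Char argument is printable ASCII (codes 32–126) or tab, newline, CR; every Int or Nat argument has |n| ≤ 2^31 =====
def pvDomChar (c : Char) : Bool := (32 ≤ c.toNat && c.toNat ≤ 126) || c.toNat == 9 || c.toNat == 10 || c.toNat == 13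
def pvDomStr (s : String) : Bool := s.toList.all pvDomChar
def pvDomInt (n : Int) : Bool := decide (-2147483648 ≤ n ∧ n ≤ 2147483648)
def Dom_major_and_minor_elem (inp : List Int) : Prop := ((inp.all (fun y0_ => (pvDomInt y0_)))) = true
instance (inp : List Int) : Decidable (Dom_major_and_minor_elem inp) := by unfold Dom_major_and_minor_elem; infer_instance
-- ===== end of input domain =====

-- B replaces the count dict plus the two max/min library reductions by an ordered
-- dedup of the values and ONE scan keeping best/worst with strict comparisons
-- (objective: alternative decomposition, no dict at all).

-- ===== PORT A =====
-- count dict built by the membership-test loop, then max/min over items by count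
def major_and_minor_elem (inp : List Int) : Int × Int :=
  let value_count_dict : PySem.Dict Int Int :=
    inp.foldl (fun d value =>
      if d.contains value then d.insert value ((d.get? value).getD 0 + 1)
      else d.insert value 1) PySem.Dict.empty
  match PySem.List.max? value_count_dict.items (fun item => item.2),
        PySem.List.min? value_count_dict.items (fun item => item.2) with
  | some mx, some mn => (mx.1, mn.1)
  | _, _ => (0, 0)   -- unreachable under Pre_: Python raises ValueError on the empty list

-- ===== PORT B =====
-- state is (best, best_c, worst, worst_c) exactly as in Source B's loop
def major_and_minor_elem_alt (inp : List Int) : Int × Int :=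
  match PySem.List.dedup inp with
  | [] => (0, 0)     -- unreachable under Pre_: Python raises IndexError on the empty list
  | k0 :: rest =>
    let st :=
      rest.foldl (fun st k =>
        let c : Int := (List.count k inp : Int)
        let st1 := if st.2.1 < c then (k, c, st.2.2.1, st.2.2.2) else st
        if c < st1.2.2.2 then (st1.1, st1.2.1, k, c) else st1)
        (k0, (List.count k0 inp : Int), k0, (List.count k0 inp : Int))
    (st.1, st.2.2.1)

-- ===== PRECONDITION & SPEC =====
-- Pre_ excludes only the empty list, on which Python A raises ValueError (max of an empty sequence).
def Pre_major_and_minor_elem (inp : List Int) : Prop := inp ≠ []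
instance (inp : List Int) : Decidable (Pre_major_and_minor_elem inp) := by unfold Pre_major_and_minor_elem; infer_instance
def pvWitness_major_and_minor_elem : List Int := [1, 2, 2]

def Spec_major_and_minor_elem (inp : List Int) (out : Int × Int) : Prop := out = major_and_minor_elem_alt inp
instance (inp : List Int) (out : Int × Int) : Decidable (Spec_major_and_minor_elem inp out) := by unfold Spec_major_and_minor_elem; infer_instance

-- ===== CLAIM (what is proved, stated in full; the proofs are below) =====
def Claim_equal_major_and_minor_elem : Prop := ∀ (inp : List Int), Dom_major_and_minor_elem inp → Pre_major_and_minor_elem inp → Spec_major_and_minor_elem inp (major_and_minor_elem inp)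

-- ===== LEMMAS AND PROOFS =====

-- A's membership-test loop builds exactly Counter(inp)
theorem aFold_eq_counter (inp : List Int) :
    inp.foldl (fun d value =>
      if d.contains value then d.insert value ((d.get? value).getD 0 + 1)
      else d.insert value 1) PySem.Dict.empty = PySem.Dict.counter inp := by
  rw [← PySem.Dict.foldl_insert_getD_add_one_eq_counter]
  apply List.foldl_ext
  intro d v _
  by_cases h : d.contains v
  · simp [h, PySem.Dict.getD_eq_get?_getD]
  · simp only [Bool.not_eq_true] at h
    simp [h, PySem.Dict.getD_of_not_contains d 0 h]

-- max?/min? over the items list (k, cnt k) is the scan over the keys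
theorem max?_map_cnt (cnt : Int → Int) (k0 : Int) (rest : List Int) :
    PySem.List.max? ((k0 :: rest).map (fun k => (k, cnt k))) (fun item => item.2)
      = some (rest.foldl (fun m x => if cnt m < cnt x then x else m) k0,
              cnt (rest.foldl (fun m x => if cnt m < cnt x then x else m) k0)) := by
  simp only [PySem.List.max?, List.map_cons, List.foldl_cons]
  induction rest generalizing k0 with
  | nil => rfl
  | cons y t ih =>
    simp only [List.map_cons, List.foldl_cons]
    by_cases h : cnt k0 < cnt y <;> simp [h, ih]

theorem min?_map_cnt (cnt : Int → Int) (k0 : Int) (rest : List Int) :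
    PySem.List.min? ((k0 :: rest).map (fun k => (k, cnt k))) (fun item => item.2)
      = some (rest.foldl (fun m x => if cnt x < cnt m then x else m) k0,
              cnt (rest.foldl (fun m x => if cnt x < cnt m then x else m) k0)) := by
  simp only [PySem.List.min?, List.map_cons, List.foldl_cons]
  induction rest generalizing k0 with
  | nil => rfl
  | cons y t ih =>
    simp only [List.map_cons, List.foldl_cons]
    by_cases h : cnt y < cnt k0 <;> simp [h, ih]

-- B's four-component scan carries exactly the max-scan and the min-scan
theorem bScan_eq (cnt : Int → Int) (rest : List Int) (bk wk : Int) :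
    rest.foldl (fun st k =>
        let c : Int := cnt k
        let st1 := if st.2.1 < c then (k, c, st.2.2.1, st.2.2.2) else st
        if c < st1.2.2.2 then (st1.1, st1.2.1, k, c) else st1)
      (bk, cnt bk, wk, cnt wk)
      = (rest.foldl (fun m x => if cnt m < cnt x then x else m) bk,
         cnt (rest.foldl (fun m x => if cnt m < cnt x then x else m) bk),
         rest.foldl (fun m x => if cnt x < cnt m then x else m) wk,
         cnt (rest.foldl (fun m x => if cnt x < cnt m then x else m) wk)) := by
  induction rest generalizing bk wk with
  | nil => rfl
  | cons y t ih =>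
    simp only [List.foldl_cons]
    by_cases h1 : cnt bk < cnt y <;> by_cases h2 : cnt y < cnt wk <;>
      simp [h1, h2, ih]

-- ===== VERDICT (by name: the statement is the Claim_ definition above) =====
theorem major_and_minor_elem_spec : Claim_equal_major_and_minor_elem := by
  intro inp _ hpre
  unfold Spec_major_and_minor_elem major_and_minor_elem major_and_minor_elem_alt
  rw [aFold_eq_counter]
  simp only [PySem.Dict.items_counter, PySem.List.dedup_eq_ofList]
  cases hset : PySem.Set.ofList inp with
  | nil =>
    exfalso
    cases inp with
    | nil => exact hpre rfl
    | cons x xs =>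
      have : x ∈ PySem.Set.ofList (x :: xs) :=
        (PySem.Set.mem_ofList (x :: xs) x).mpr (List.mem_cons_self)
      rw [hset] at this; exact absurd this (List.not_mem_nil)
  | cons k0 rest =>
    rw [max?_map_cnt (fun k => (List.count k inp : Int)) k0 rest,
        min?_map_cnt (fun k => (List.count k inp : Int)) k0 rest]
    simp only
    rw [bScan_eq (fun k => (List.count k inp : Int)) rest k0 k0]
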